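-- pv_equiv track=rewrite | github.com/khuramgill/Ai-Labs | Lab 3/2022-Cs-48.py | unbalanced_brackets_recursive
-- ===== SOURCE A (Python) =====
-- def unbalanced_brackets_recursive(sequence, index = 0, open_count = 0, close_count = 0):
--     if len(sequence) == index:
--         return '(' * close_count + sequence + ')' * open_count
--     char = sequence[index]
--     if char == '(':
--         return unbalanced_brackets_recursive(sequence, index + 1, open_count + 1, close_count)
--     elif char == ')':
--         if open_count > 0:
--             return unbalanced_brackets_recursive(sequence, index + 1, open_count - 1, close_count )
--         else:
--             return unbalanced_brackets_recursive(sequence, index + 1, open_count , close_count+ 1)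
--     else:
--         return unbalanced_brackets_recursive(sequence, index + 1, open_count, close_count)
-- ===== SOURCE B (Python) =====
-- def unbalanced_brackets_recursive(sequence, index=0, open_count=0, close_count=0):
--     opens, closes = open_count, close_count
--     for i in range(index, len(sequence)):
--         c = sequence[i]
--         if c == '(':
--             opens += 1
--         elif c == ')':
--             if opens > 0:
--                 opens -= 1
--             else:
--                 closes += 1
--     return '(' * closes + sequence + ')' * opens
-- ===== Notes on version B (the rewrite author's own statement) =====
-- stated objective: idiomatic
-- what changed: Replaces the four-way quadratic-stack recursion by a single iterative loop over range(index, len(sequence)) accumulating the two counters, then builds the result once.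
import Mathlib
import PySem

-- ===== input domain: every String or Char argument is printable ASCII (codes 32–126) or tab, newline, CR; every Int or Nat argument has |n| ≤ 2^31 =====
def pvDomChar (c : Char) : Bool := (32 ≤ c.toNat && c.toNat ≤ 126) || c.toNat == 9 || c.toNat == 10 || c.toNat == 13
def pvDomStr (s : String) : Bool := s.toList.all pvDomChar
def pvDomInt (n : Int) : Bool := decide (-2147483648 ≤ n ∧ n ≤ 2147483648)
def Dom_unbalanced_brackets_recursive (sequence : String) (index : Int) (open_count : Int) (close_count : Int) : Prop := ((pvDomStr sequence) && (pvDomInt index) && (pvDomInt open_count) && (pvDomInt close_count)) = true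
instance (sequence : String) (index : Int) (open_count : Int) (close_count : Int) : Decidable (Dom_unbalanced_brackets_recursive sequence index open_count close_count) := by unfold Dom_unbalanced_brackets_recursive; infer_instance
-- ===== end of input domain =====

-- B replaces A's deep four-way recursion by one iterative counter loop and a single final concatenation (idiomatic, O(1) extra space).

-- ===== PORT A =====
-- literal transliteration of A's recursion on the character list; the fuel argument only makes the
-- recursion structural (it is (len - index).toNat, enough for every terminating run; when it runs out
-- with index ≠ len, index > len and Python raises IndexError — the [] branches are exactly Python's IndexError, excluded by Pre_)
def pvALoop (cs : List Char) (fuel : Nat) (index : Int) (open_count : Int) (close_count : Int) : List Char :=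
  if (cs.length : Int) = index then
    PySem.List.pyRepeat ['('] close_count ++ cs ++ PySem.List.pyRepeat [')'] open_count
  else
    match fuel, PySem.List.pyGet? cs index with
    | _, none => []            -- Python raises IndexError here
    | 0, some _ => []          -- unreachable with the fuel the wrapper supplies (index would exceed len)
    | fuel + 1, some ch =>
      if ch = '(' then pvALoop cs fuel (index + 1) (open_count + 1) close_count
      else if ch = ')' then
        if open_count > 0 then pvALoop cs fuel (index + 1) (open_count - 1) close_count
        else pvALoop cs fuel (index + 1) open_count (close_count + 1)
      else pvALoop cs fuel (index + 1) open_count close_count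

def unbalanced_brackets_recursive (sequence : String) (index : Int) (open_count : Int) (close_count : Int) : String :=
  String.ofList (pvALoop sequence.toList ((sequence.toList.length : Int) - index).toNat index open_count close_count)

-- ===== PORT B =====
-- transliteration of Source B: fold the counter update over range(index, len(sequence)), then build the output once
def pvBStep (cs : List Char) (st : Int × Int) (i : Int) : Int × Int :=
  let ch := (PySem.List.pyGet? cs i).getD ' '
  if ch = '(' then (st.1 + 1, st.2)
  else if ch = ')' then
    if st.1 > 0 then (st.1 - 1, st.2) else (st.1, st.2 + 1)
  else st

def unbalanced_brackets_recursive_alt (sequence : String) (index : Int) (open_count : Int) (close_count : Int) : String :=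
  let cs := sequence.toList
  let st := (PySem.List.pyRange index cs.length 1).foldl (pvBStep cs) (open_count, close_count)
  String.ofList (PySem.List.pyRepeat ['('] st.2 ++ cs ++ PySem.List.pyRepeat [')'] st.1)

-- ===== PRECONDITION & SPEC =====
-- A raises IndexError when index < -len(sequence) or index > len(sequence); exactly those inputs are excluded.
def Pre_unbalanced_brackets_recursive (sequence : String) (index : Int) (open_count : Int) (close_count : Int) : Prop :=
  -(sequence.toList.length : Int) ≤ index ∧ index ≤ (sequence.toList.length : Int)
instance (sequence : String) (index : Int) (open_count : Int) (close_count : Int) : Decidable (Pre_unbalanced_brackets_recursive sequence index open_count close_count) := by unfold Pre_unbalanced_brackets_recursive; infer_instance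

def pvWitness_unbalanced_brackets_recursive : String × Int × Int × Int := ("a)b(", 0, 0, 0)

def Spec_unbalanced_brackets_recursive (sequence : String) (index : Int) (open_count : Int) (close_count : Int) (out : String) : Prop := out = unbalanced_brackets_recursive_alt sequence index open_count close_count
instance (sequence : String) (index : Int) (open_count : Int) (close_count : Int) (out : String) : Decidable (Spec_unbalanced_brackets_recursive sequence index open_count close_count out) := by unfold Spec_unbalanced_brackets_recursive; infer_instance

-- ===== CLAIM (what is proved, stated in full; the proofs are below) =====
def Claim_equal_unbalanced_brackets_recursive : Prop := ∀ (sequence : String) (index : Int) (open_count : Int) (close_count : Int), Dom_unbalanced_brackets_recursive sequence index open_count close_count → Pre_unbalanced_brackets_recursive sequence index open_count close_count → Spec_unbalanced_brackets_recursive sequence index open_count close_count (unbalanced_brackets_recursive sequence index open_count close_count)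

-- ===== LEMMAS AND PROOFS =====

theorem pvMain (cs : List Char) :
    ∀ (n : Nat) (index open_count close_count : Int),
      (cs.length - index).toNat = n →
      -(cs.length : Int) ≤ index → index ≤ (cs.length : Int) →
      pvALoop cs n index open_count close_count =
        (fun st : Int × Int =>
           PySem.List.pyRepeat ['('] st.2 ++ cs ++ PySem.List.pyRepeat [')'] st.1)
          ((PySem.List.pyRange index cs.length 1).foldl (pvBStep cs) (open_count, close_count)) := by
  intro n
  induction n with
  | zero =>
    intro index o c hn hlo hhi
    have hix : index = (cs.length : Int) := by omega
    subst hix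
    rw [pvALoop.eq_def, if_pos rfl, PySem.List.pyRange_one_eq_nil (by omega)]
    simp
  | succ n ih =>
    intro index o c hn hlo hhi
    have hlt : index < (cs.length : Int) := by omega
    have hne : PySem.List.pyGet? cs index ≠ none := by
      intro hno
      rw [PySem.List.pyGet?_eq_none_iff] at hno
      exact hno (by simp only [PySem.Raise.InRange]; omega)
    obtain ⟨ch, hch⟩ := Option.ne_none_iff_exists'.mp hne
    rw [pvALoop.eq_def, if_neg (by omega), hch, PySem.List.pyRange_one_cons hlt]
    simp only [List.foldl_cons]
    have hstep : pvBStep cs (o, c) index =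
        (if ch = '(' then (o + 1, c)
         else if ch = ')' then (if o > 0 then (o - 1, c) else (o, c + 1))
         else (o, c)) := by
      simp [pvBStep, hch]
    rw [hstep]
    by_cases h1 : ch = '('
    · rw [if_pos h1, if_pos h1, ih _ _ _ (by omega) (by omega) (by omega)]
    · by_cases h2 : ch = ')'
      · rw [if_neg h1, if_pos h2, if_neg h1, if_pos h2]
        by_cases h3 : o > 0
        · rw [if_pos h3, if_pos h3, ih _ _ _ (by omega) (by omega) (by omega)]
        · rw [if_neg h3, if_neg h3, ih _ _ _ (by omega) (by omega) (by omega)]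
      · rw [if_neg h1, if_neg h2, if_neg h1, if_neg h2,
          ih _ _ _ (by omega) (by omega) (by omega)]

-- ===== VERDICT (by name: the statement is the Claim_ definition above) =====
theorem unbalanced_brackets_recursive_spec : Claim_equal_unbalanced_brackets_recursive := by
  intro sequence index o c _ hpre
  unfold Spec_unbalanced_brackets_recursive unbalanced_brackets_recursive unbalanced_brackets_recursive_alt
  rw [pvMain sequence.toList _ index o c rfl hpre.1 hpre.2]
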